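-- pv_equiv track=rewrite | github.com/DCSdevelop/domainFinderLost | checker.py | build_domain_index
-- ===== SOURCE A (Python) =====
-- def build_domain_index(
--     domains_by_year: dict[int, list[str]],
--     filter_year: int | None = None,
--     quick: bool = False,
-- ) -> tuple[list[str], dict[str, list[int]]]:
--     """
--     Build a deduplicated domain list and a mapping of domain -> years it appeared.
--
--     Parameters
--     ----------
--     domains_by_year : dict mapping year (int) to list of domain strings
--     filter_year : optional single year to restrict to
--     quick : if True, only take first 5 domains per year
--
--     Returns
--     -------
--     (unique_domains, domain_years) where domain_years maps each domain to its
--     list of years.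
--     """
--     domain_years: dict[str, list[int]] = {}
--
--     years = [filter_year] if filter_year else sorted(domains_by_year.keys())
--
--     for year in years:
--         domains = domains_by_year.get(year, [])
--         if quick:
--             domains = domains[:5]
--         for domain in domains:
--             domain = domain.strip().lower()
--             if not domain:
--                 continue
--             domain_years.setdefault(domain, []).append(year)
--
--     # Sort years for each domain
--     for d in domain_years:
--         domain_years[d] = sorted(set(domain_years[d]))
--
--     unique_domains = sorted(domain_years.keys())
--     return unique_domains, domain_years
-- ===== SOURCE B (Python) =====
-- def build_domain_index(
--     domains_by_year,
--     filter_year=None,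
--     quick=False,
-- ):
--     """Flatten to (domain, year) pairs, dedupe the pairs once in traversal
--     order, then group; because years are visited in sorted order, each
--     domain's deduped year list is already sorted — no per-domain sort/set."""
--     years = [filter_year] if filter_year else sorted(domains_by_year)
--     pairs = dict.fromkeys(
--         (d, year)
--         for year in years
--         for raw in (domains_by_year.get(year, [])[:5] if quick
--                     else domains_by_year.get(year, []))
--         if (d := raw.strip().lower())
--     )
--     domain_years = {}
--     for d, year in pairs:
--         domain_years.setdefault(d, []).append(year)
--     unique_domains = sorted(domain_years)
--     return unique_domains, domain_years
-- ===== Notes on version B (the rewrite author's own statement) =====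
-- stated objective: alternative
-- what changed: Instead of A's fused dict-building loop (append the year to each domain's list, then a second pass replacing every value by sorted(set(...))), B flattens the selected years into one (domain, year) pair stream, dedupes the pairs once with dict.fromkeys, and groups them with a single setdefault fold; since years are visited in sorted order each domain's deduped year list is already sorted, so the per-domain sorted(set(...)) pass disappears.
import Mathlib
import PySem

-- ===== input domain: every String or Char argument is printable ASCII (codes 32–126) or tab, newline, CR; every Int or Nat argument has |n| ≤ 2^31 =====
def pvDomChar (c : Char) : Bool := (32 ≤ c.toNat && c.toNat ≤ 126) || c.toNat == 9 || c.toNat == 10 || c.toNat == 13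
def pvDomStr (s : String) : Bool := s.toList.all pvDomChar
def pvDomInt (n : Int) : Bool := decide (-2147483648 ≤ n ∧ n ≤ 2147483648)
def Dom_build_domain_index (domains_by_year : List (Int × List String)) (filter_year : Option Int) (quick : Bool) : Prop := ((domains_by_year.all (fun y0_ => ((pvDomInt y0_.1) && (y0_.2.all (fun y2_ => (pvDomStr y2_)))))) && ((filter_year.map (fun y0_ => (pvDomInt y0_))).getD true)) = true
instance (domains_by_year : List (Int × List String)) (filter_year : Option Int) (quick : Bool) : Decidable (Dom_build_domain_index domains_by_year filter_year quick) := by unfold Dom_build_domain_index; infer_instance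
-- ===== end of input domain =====

-- B replaces A's fused build (append year lists per domain, then a second pass doing sorted(set(...)))
-- by: flatten to (domain, year) pairs, dedupe the pairs once, group — the sorted year traversal makes
-- each deduped year list already sorted, so no per-domain sort/set pass is needed (objective: alternative).

-- ===== PORT A =====
def build_domain_index (domains_by_year : List (Int × List String)) (filter_year : Option Int) (quick : Bool) : List String × (List (String × List Int)) :=
  let dby := PySem.Dict.mk domains_by_year
  let years : List Int :=
    match filter_year with
    | some fy => if fy ≠ 0 then [fy] else PySem.List.sorted dby.keys (fun x => x) false
    | none => PySem.List.sorted dby.keys (fun x => x) false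
  let domain_years : PySem.Dict String (List Int) :=
    years.foldl (fun acc year =>
      let domains := dby.getD year []
      let domains := if quick then PySem.List.slice domains none (some 5) else domains
      domains.foldl (fun acc domain =>
        let d := PySem.Str.lower (PySem.Str.strip domain)
        if d = "" then acc else acc.modify d [] (· ++ [year])) acc) PySem.Dict.empty
  let domain_years := PySem.Dict.mk (domain_years.items.map (fun p =>
    (p.1, PySem.List.sorted (PySem.Set.ofList p.2) (fun x => x) false)))
  (PySem.List.sorted domain_years.keys (fun x => x.toList) false, domain_years.items)

-- ===== PORT B =====
def build_domain_index_alt (domains_by_year : List (Int × List String)) (filter_year : Option Int) (quick : Bool) : List String × (List (String × List Int)) :=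
  let dby := PySem.Dict.mk domains_by_year
  let years : List Int :=
    match filter_year with
    | some fy => if fy ≠ 0 then [fy] else PySem.List.sorted dby.keys (fun x => x) false
    | none => PySem.List.sorted dby.keys (fun x => x) false
  let pairs : List (String × Int) := PySem.List.dedup
    (years.flatMap (fun year =>
      (if quick then PySem.List.slice (dby.getD year []) none (some 5) else dby.getD year []).filterMap
        (fun raw =>
          let d := PySem.Str.lower (PySem.Str.strip raw)
          if d = "" then none else some (d, year))))
  let domain_years : PySem.Dict String (List Int) :=
    pairs.foldl (fun acc p => acc.modify p.1 [] (· ++ [p.2])) PySem.Dict.empty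
  (PySem.List.sorted domain_years.keys (fun x => x.toList) false, domain_years.items)

-- ===== PRECONDITION & SPEC =====
def Spec_build_domain_index (domains_by_year : List (Int × List String)) (filter_year : Option Int) (quick : Bool) (out : List String × (List (String × List Int))) : Prop := out = build_domain_index_alt domains_by_year filter_year quick
instance (domains_by_year : List (Int × List String)) (filter_year : Option Int) (quick : Bool) (out : List String × (List (String × List Int))) : Decidable (Spec_build_domain_index domains_by_year filter_year quick out) := by unfold Spec_build_domain_index; infer_instance

-- ===== CLAIM (what is proved, stated in full; the proofs are below) =====
def Claim_equal_build_domain_index : Prop := ∀ (domains_by_year : List (Int × List String)) (filter_year : Option Int) (quick : Bool), Dom_build_domain_index domains_by_year filter_year quick → Spec_build_domain_index domains_by_year filter_year quick (build_domain_index domains_by_year filter_year quick)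

-- ===== LEMMAS AND PROOFS =====
theorem pv_add_of_mem {α : Type} [BEq α] [LawfulBEq α] {s : PySem.Set α} {x : α} (h : x ∈ s) :
    PySem.Set.add s x = s := by
  simp [PySem.Set.add, h]

theorem pv_add_of_not_mem {α : Type} [BEq α] [LawfulBEq α] {s : PySem.Set α} {x : α} (h : x ∉ s) :
    PySem.Set.add s x = s ++ [x] := by
  simp only [PySem.Set.add]
  rw [if_neg]
  simp [h]

theorem pv_filter_ofList {α : Type} [BEq α] [LawfulBEq α] (p : α → Bool) (l : List α) :
    (PySem.Set.ofList l).filter p = PySem.Set.ofList (l.filter p) := by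
  induction l using List.reverseRecOn with
  | nil => rfl
  | append_singleton l x ih =>
    rw [PySem.Set.ofList_append_singleton, List.filter_append]
    by_cases hx : x ∈ l
    · rw [pv_add_of_mem (by simp [PySem.Set.mem_ofList, hx])]
      by_cases hp : p x
      · simp only [List.filter_cons, List.filter_nil, hp, if_pos trivial, ih,
          PySem.Set.ofList_append_singleton]
        rw [pv_add_of_mem (by simp [PySem.Set.mem_ofList, List.mem_filter, hx, hp])]
      · simp [hp, ih]
    · rw [pv_add_of_not_mem (by simp [PySem.Set.mem_ofList, hx]), List.filter_append]
      by_cases hp : p x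
      · simp only [List.filter_cons, List.filter_nil, hp, if_pos trivial, ih,
          PySem.Set.ofList_append_singleton]
        rw [pv_add_of_not_mem (by simp [PySem.Set.mem_ofList, List.mem_filter, hx])]
      · simp [hp, ih]

theorem pv_ofList_map_ofList {α β : Type} [BEq α] [LawfulBEq α] [BEq β] [LawfulBEq β]
    (f : α → β) (l : List α) :
    PySem.Set.ofList ((PySem.Set.ofList l).map f) = PySem.Set.ofList (l.map f) := by
  induction l using List.reverseRecOn with
  | nil => rfl
  | append_singleton l x ih =>
    rw [PySem.Set.ofList_append_singleton, List.map_append]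
    simp only [List.map_cons, List.map_nil]
    by_cases hx : x ∈ l
    · rw [pv_add_of_mem (by simp [PySem.Set.mem_ofList, hx]), ih,
        PySem.Set.ofList_append_singleton,
        pv_add_of_mem (by simp [PySem.Set.mem_ofList]; exact ⟨x, hx, rfl⟩)]
    · rw [pv_add_of_not_mem (by simp [PySem.Set.mem_ofList, hx]), List.map_append,
        List.map_cons, List.map_nil,
        PySem.Set.ofList_append_singleton, PySem.Set.ofList_append_singleton, ih]

theorem pv_map_snd_ofList {α β : Type} [BEq α] [LawfulBEq α] [BEq β] [LawfulBEq β]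
    (c : α) (l : List (α × β)) (h : ∀ p ∈ l, p.1 = c) :
    (PySem.Set.ofList l).map Prod.snd = PySem.Set.ofList (l.map Prod.snd) := by
  induction l using List.reverseRecOn with
  | nil => rfl
  | append_singleton l x ih =>
    have hl : ∀ p ∈ l, p.1 = c := fun p hp => h p (by simp [hp])
    have hx1 : x.1 = c := h x (by simp)
    rw [PySem.Set.ofList_append_singleton, List.map_append]
    simp only [List.map_cons, List.map_nil]
    rw [PySem.Set.ofList_append_singleton]
    by_cases hx : x ∈ l
    · rw [pv_add_of_mem (by simp [PySem.Set.mem_ofList, hx]), ih hl,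
        pv_add_of_mem (by rw [PySem.Set.mem_ofList]; exact List.mem_map_of_mem hx)]
    · have hx2 : x.2 ∉ PySem.Set.ofList (List.map Prod.snd l) := by
        rw [PySem.Set.mem_ofList, List.mem_map]
        rintro ⟨q, hq, hq2⟩
        exact hx ((Prod.ext ((hl q hq).trans hx1.symm) hq2) ▸ hq)
      rw [pv_add_of_not_mem (by simp [PySem.Set.mem_ofList, hx]), List.map_append,
        List.map_cons, List.map_nil, ih hl, pv_add_of_not_mem hx2]

theorem pv_ofList_sublist {α : Type} [BEq α] [LawfulBEq α] (l : List α) :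
    (PySem.Set.ofList l).Sublist l := by
  induction l with
  | nil => simp [PySem.Set.ofList]
  | cons x xs ih =>
    rw [PySem.Set.ofList_cons]
    exact List.Sublist.cons₂ x (List.Sublist.trans List.filter_sublist ih)

theorem pv_sorted_ofList_of_pairwise (ys : List Int) (h : ys.Pairwise (· ≤ ·)) :
    PySem.List.sorted (PySem.Set.ofList ys) (fun x => x) false = PySem.Set.ofList ys :=
  PySem.List.sorted_eq_self_of_pairwise _ _ (h.sublist (pv_ofList_sublist ys))

-- A's fused inner loop over the raw domain strings is the fold of the grouping step over the
-- (normalized domain, year) pairs that survive the empty-skip filter.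
theorem pv_innerA (ds : List String) (y : Int) (acc : PySem.Dict String (List Int)) :
    ds.foldl (fun acc domain =>
        let d := PySem.Str.lower (PySem.Str.strip domain)
        if d = "" then acc else acc.modify d [] (· ++ [y])) acc
      = (ds.filterMap (fun raw =>
          let d := PySem.Str.lower (PySem.Str.strip raw)
          if d = "" then none else some (d, y))).foldl
            (fun acc p => acc.modify p.1 [] (· ++ [p.2])) acc := by
  induction ds generalizing acc with
  | nil => rfl
  | cons x xs ih =>
    by_cases h : PySem.Str.lower (PySem.Str.strip x) = ""
    · simp [h, ih]
    · simp [h, ih]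

-- the grouping fold, described: keys are the distinct firsts, values the filtered seconds
theorem pv_groupfold_items (l : List (String × Int)) :
    (l.foldl (fun acc p => acc.modify p.1 [] (· ++ [p.2])) PySem.Dict.empty).items
      = (PySem.Set.ofList (l.map Prod.fst)).map
          (fun c => (c, (l.filter (fun p => p.1 == c)).map (fun x => x.2))) := by
  have hnd : (l.foldl (fun acc p => acc.modify p.1 [] (· ++ [p.2])) PySem.Dict.empty).keys.Nodup :=
    PySem.Dict.nodup_keys_foldl_modify_key l Prod.fst [] (fun _ p => (· ++ [p.2]))
      PySem.Dict.empty (by simp [PySem.Dict.empty, PySem.Dict.keys])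
  rw [PySem.Dict.items_eq_map_keys _ hnd []]
  have hkeys : (l.foldl (fun acc p => acc.modify p.1 [] (· ++ [p.2])) PySem.Dict.empty).keys
      = PySem.Set.ofList (l.map Prod.fst) := by
    rw [PySem.Dict.keys_foldl_modify_key l Prod.fst [] (fun _ p => (· ++ [p.2]))]
    simp [PySem.Dict.empty, PySem.Dict.keys, PySem.Set.update_nil_left]
  rw [hkeys]
  refine List.map_congr_left ?_
  intro c _
  rw [PySem.Dict.getD_foldl_modify_append l PySem.Dict.empty c]
  simp [PySem.Dict.empty, PySem.Dict.getD, PySem.Dict.get?]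

theorem pv_g_snd (ds : List String) (y : Int)
    (p : String × Int)
    (hp : p ∈ ds.filterMap
        (fun raw =>
          let d := PySem.Str.lower (PySem.Str.strip raw)
          if d = "" then none else some (d, y))) : p.2 = y := by
  rw [List.mem_filterMap] at hp
  obtain ⟨raw, _, hconv⟩ := hp
  dsimp only at hconv
  by_cases h : PySem.Str.lower (PySem.Str.strip raw) = ""
  · rw [if_pos h] at hconv
    exact absurd hconv (by simp)
  · rw [if_neg h] at hconv
    rw [← Option.some.inj hconv]

theorem pv_L_pairwise (dby : PySem.Dict Int (List String)) (quick : Bool) (years : List Int)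
    (hy : years.Pairwise (· ≤ ·)) :
    (years.flatMap (fun year =>
      (if quick then PySem.List.slice (dby.getD year []) none (some 5) else dby.getD year []).filterMap
        (fun raw =>
          let d := PySem.Str.lower (PySem.Str.strip raw)
          if d = "" then none else some (d, year)))).Pairwise (fun p q => p.2 ≤ q.2) := by
  rw [List.pairwise_flatMap]
  constructor
  · intro y _
    apply List.pairwise_of_forall_mem_list
    intro p hp q hq
    rw [pv_g_snd _ y p hp, pv_g_snd _ y q hq]
  · exact hy.imp (fun {y1 y2} h => fun p hp q hq => by
      rw [pv_g_snd _ y1 p hp, pv_g_snd _ y2 q hq]; exact h)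

set_option maxHeartbeats 1000000 in
theorem pv_master (dby : PySem.Dict Int (List String)) (quick : Bool) (years : List Int)
    (hy : years.Pairwise (· ≤ ·)) :
    (let domain_years : PySem.Dict String (List Int) :=
       years.foldl (fun acc year =>
         let domains := dby.getD year []
         let domains := if quick then PySem.List.slice domains none (some 5) else domains
         domains.foldl (fun acc domain =>
           let d := PySem.Str.lower (PySem.Str.strip domain)
           if d = "" then acc else acc.modify d [] (· ++ [year])) acc) PySem.Dict.empty
     let domain_years := PySem.Dict.mk (domain_years.items.map (fun p =>
       (p.1, PySem.List.sorted (PySem.Set.ofList p.2) (fun x => x) false)))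
     (PySem.List.sorted domain_years.keys (fun x => x.toList) false, domain_years.items))
    = (let pairs : List (String × Int) := PySem.List.dedup
         (years.flatMap (fun year =>
           (if quick then PySem.List.slice (dby.getD year []) none (some 5) else dby.getD year []).filterMap
             (fun raw =>
               let d := PySem.Str.lower (PySem.Str.strip raw)
               if d = "" then none else some (d, year))))
       let domain_years : PySem.Dict String (List Int) :=
         pairs.foldl (fun acc p => acc.modify p.1 [] (· ++ [p.2])) PySem.Dict.empty
       (PySem.List.sorted domain_years.keys (fun x => x.toList) false, domain_years.items)) := by
  dsimp only
  -- name the flattened pair list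
  set L : List (String × Int) := years.flatMap (fun year =>
      (if quick then PySem.List.slice (dby.getD year []) none (some 5) else dby.getD year []).filterMap
        (fun raw =>
          let d := PySem.Str.lower (PySem.Str.strip raw)
          if d = "" then none else some (d, year))) with hL
  -- A's fused loop is the grouping fold over L
  have hA : years.foldl (fun acc year =>
         let domains := dby.getD year []
         let domains := if quick then PySem.List.slice domains none (some 5) else domains
         domains.foldl (fun acc domain =>
           let d := PySem.Str.lower (PySem.Str.strip domain)
           if d = "" then acc else acc.modify d [] (· ++ [year])) acc) PySem.Dict.empty
       = L.foldl (fun acc p => acc.modify p.1 [] (· ++ [p.2])) PySem.Dict.empty := by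
    rw [hL, List.foldl_flatMap]
    congr 1
    funext acc year
    exact pv_innerA _ year acc
  rw [hA]
  have hpair := pv_L_pairwise dby quick years hy
  rw [← hL] at hpair
  -- both sides described by pv_groupfold_items
  have hBitems := pv_groupfold_items (PySem.List.dedup L)
  have hAitems := pv_groupfold_items L
  have hkey : PySem.Set.ofList ((PySem.List.dedup L).map Prod.fst)
      = PySem.Set.ofList (L.map Prod.fst) := by
    simp only [PySem.List.dedup_eq_ofList]
    exact pv_ofList_map_ofList Prod.fst L
  have hval : ∀ c : String,
      ((PySem.List.dedup L).filter (fun p => p.1 == c)).map (fun x => x.2)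
        = PySem.List.sorted (PySem.Set.ofList ((L.filter (fun p => p.1 == c)).map (fun x => x.2)))
            (fun x => x) false := by
    intro c
    have hc : ∀ p ∈ L.filter (fun p => p.1 == c), p.1 = c := by
      intro p hp
      simpa using (List.mem_filter.mp hp).2
    have hys : ((L.filter (fun p => p.1 == c)).map (fun x : String × Int => x.2)).Pairwise (· ≤ ·) := by
      rw [List.pairwise_map]
      exact (hpair.sublist List.filter_sublist)
    rw [pv_sorted_ofList_of_pairwise _ hys]
    simp only [PySem.List.dedup_eq_ofList]
    rw [pv_filter_ofList]
    exact pv_map_snd_ofList c _ hc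
  -- items of the two final dicts agree
  have hitems : ((L.foldl (fun acc p => acc.modify p.1 [] (· ++ [p.2])) PySem.Dict.empty).items.map
        (fun p => (p.1, PySem.List.sorted (PySem.Set.ofList p.2) (fun x => x) false)))
      = ((PySem.List.dedup L).foldl (fun acc p => acc.modify p.1 [] (· ++ [p.2])) PySem.Dict.empty).items := by
    rw [hAitems, hBitems, hkey, List.map_map]
    refine List.map_congr_left ?_
    intro c _
    simp only [Function.comp]
    rw [hval c]
  refine Prod.ext ?_ ?_
  · show PySem.List.sorted (PySem.Dict.mk _).keys (fun x : String => x.toList) false = _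
    rw [PySem.Dict.keys_mk]
    rw [hitems]
    rfl
  · show (PySem.Dict.mk _).items = _
    rw [show ∀ (l : List (String × List Int)), (PySem.Dict.mk l).items = l from fun _ => rfl]
    exact hitems

-- ===== VERDICT (by name: the statement is the Claim_ definition above) =====
theorem build_domain_index_spec : Claim_equal_build_domain_index := by
  intro domains_by_year filter_year quick _
  show build_domain_index domains_by_year filter_year quick
      = build_domain_index_alt domains_by_year filter_year quick
  unfold build_domain_index build_domain_index_alt
  dsimp only
  cases filter_year with
  | none =>
    dsimp only
    exact pv_master _ quick _
      (by simpa using PySem.List.sorted_pairwise (PySem.Dict.mk domains_by_year).keys (fun x : Int => x))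
  | some fy =>
    dsimp only
    by_cases h : fy ≠ 0
    · rw [if_pos h]
      exact pv_master _ quick _ (List.pairwise_singleton _ _)
    · rw [if_neg h]
      exact pv_master _ quick _
        (by simpa using PySem.List.sorted_pairwise (PySem.Dict.mk domains_by_year).keys (fun x : Int => x))
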